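-- pv_equiv track=rewrite | github.com/TechReport2023/LDPGuard | LDPGuardCode/LDPGuard.py | array_compare
-- ===== SOURCE A (Python) =====
-- def array_compare(a_perturbed_original_dataset1, a_perturbed_original_dataset2, comparedbits):
--     returnv = True
--     for item in comparedbits:
--         if item not in a_perturbed_original_dataset1 and   item in a_perturbed_original_dataset2:
--             return False
--         if item in a_perturbed_original_dataset1 and   item not in a_perturbed_original_dataset2:
--             return False
--     return returnv
-- ===== SOURCE B (Python) =====
-- def array_compare(a_perturbed_original_dataset1, a_perturbed_original_dataset2, comparedbits):
--     cb = set(comparedbits)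
--     return cb & set(a_perturbed_original_dataset1) == cb & set(a_perturbed_original_dataset2)
-- ===== Notes on version B (the rewrite author's own statement) =====
-- stated objective: simpler
-- what changed: Replaces the per-item loop with two early-return branches by set algebra: intersect the set of compared bits with each dataset's set and compare the two intersections for set equality.
import Mathlib
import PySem

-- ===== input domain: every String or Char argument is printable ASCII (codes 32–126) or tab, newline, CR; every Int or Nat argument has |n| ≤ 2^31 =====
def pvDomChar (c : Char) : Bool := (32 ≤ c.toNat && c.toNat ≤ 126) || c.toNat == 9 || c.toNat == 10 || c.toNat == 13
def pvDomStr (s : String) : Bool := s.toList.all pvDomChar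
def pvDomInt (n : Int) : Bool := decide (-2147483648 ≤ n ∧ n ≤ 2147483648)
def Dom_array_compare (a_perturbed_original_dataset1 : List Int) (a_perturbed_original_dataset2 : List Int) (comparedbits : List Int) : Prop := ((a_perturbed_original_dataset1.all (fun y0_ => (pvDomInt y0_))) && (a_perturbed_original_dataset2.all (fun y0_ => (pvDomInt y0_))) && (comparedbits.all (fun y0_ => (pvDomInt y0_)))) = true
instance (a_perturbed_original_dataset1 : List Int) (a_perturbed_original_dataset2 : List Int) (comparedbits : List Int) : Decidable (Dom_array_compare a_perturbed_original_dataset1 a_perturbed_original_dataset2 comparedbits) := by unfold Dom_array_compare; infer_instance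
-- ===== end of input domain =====

-- B replaces A's per-item loop (with two early-return branches) by set algebra:
-- compare the intersections set(comparedbits)&set(ds1) and set(comparedbits)&set(ds2) for set equality (simpler).


-- ===== PORT A =====
-- the for-loop with its two early 'return False' branches, as structural recursion over comparedbits
def arrayCompareLoop (ds1 : List Int) (ds2 : List Int) : List Int → Bool
  | [] => true            -- returnv
  | item :: rest =>
    if !ds1.contains item && ds2.contains item then false
    else if ds1.contains item && !ds2.contains item then false
    else arrayCompareLoop ds1 ds2 rest

def array_compare (a_perturbed_original_dataset1 : List Int) (a_perturbed_original_dataset2 : List Int) (comparedbits : List Int) : Bool :=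
  arrayCompareLoop a_perturbed_original_dataset1 a_perturbed_original_dataset2 comparedbits

-- ===== PORT B =====
def array_compare_alt (a_perturbed_original_dataset1 : List Int) (a_perturbed_original_dataset2 : List Int) (comparedbits : List Int) : Bool :=
  let cb : PySem.Set Int := PySem.Set.ofList comparedbits
  PySem.Set.equal (PySem.Set.inter cb (PySem.Set.ofList a_perturbed_original_dataset1))
                  (PySem.Set.inter cb (PySem.Set.ofList a_perturbed_original_dataset2))

-- ===== PRECONDITION & SPEC =====
def Spec_array_compare (a_perturbed_original_dataset1 : List Int) (a_perturbed_original_dataset2 : List Int) (comparedbits : List Int) (out : Bool) : Prop := out = array_compare_alt a_perturbed_original_dataset1 a_perturbed_original_dataset2 comparedbits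
instance (a_perturbed_original_dataset1 : List Int) (a_perturbed_original_dataset2 : List Int) (comparedbits : List Int) (out : Bool) : Decidable (Spec_array_compare a_perturbed_original_dataset1 a_perturbed_original_dataset2 comparedbits out) := by unfold Spec_array_compare; infer_instance

-- ===== CLAIM (what is proved, stated in full; the proofs are below) =====
def Claim_equal_array_compare : Prop := ∀ (a_perturbed_original_dataset1 : List Int) (a_perturbed_original_dataset2 : List Int) (comparedbits : List Int), Dom_array_compare a_perturbed_original_dataset1 a_perturbed_original_dataset2 comparedbits → Spec_array_compare a_perturbed_original_dataset1 a_perturbed_original_dataset2 comparedbits (array_compare a_perturbed_original_dataset1 a_perturbed_original_dataset2 comparedbits)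

-- ===== LEMMAS AND PROOFS =====

-- A's loop returns true exactly when every compared item has equal membership in both datasets
theorem arrayCompareLoop_eq_true_iff (ds1 ds2 cb : List Int) :
    arrayCompareLoop ds1 ds2 cb = true ↔ ∀ x ∈ cb, (x ∈ ds1 ↔ x ∈ ds2) := by
  induction cb with
  | nil => simp [arrayCompareLoop]
  | cons item rest ih =>
    simp only [arrayCompareLoop]
    by_cases h1 : item ∈ ds1 <;> by_cases h2 : item ∈ ds2 <;>
      simp [h1, h2, ih]

-- B returns true exactly under the same condition
theorem alt_eq_true_iff (ds1 ds2 cb : List Int) :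
    array_compare_alt ds1 ds2 cb = true ↔ ∀ x ∈ cb, (x ∈ ds1 ↔ x ∈ ds2) := by
  unfold array_compare_alt
  rw [PySem.Set.equal_iff]
  constructor
  · intro h x hx
    have := h x
    simp [PySem.Set.mem_inter, PySem.Set.mem_ofList, hx] at this
    exact this
  · intro h x
    simp only [PySem.Set.mem_inter, PySem.Set.mem_ofList]
    constructor
    · rintro ⟨hcb, hd⟩; exact ⟨hcb, (h x hcb).mp hd⟩
    · rintro ⟨hcb, hd⟩; exact ⟨hcb, (h x hcb).mpr hd⟩

-- ===== VERDICT (by name: the statement is the Claim_ definition above) =====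
theorem array_compare_spec : Claim_equal_array_compare := by
  intro ds1 ds2 cb _
  unfold Spec_array_compare array_compare
  rw [Bool.eq_iff_iff, arrayCompareLoop_eq_true_iff, alt_eq_true_iff]
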